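-- pv_equiv track=rewrite | github.com/t33pa/aoc2023 | day9/code.py | sub_row
-- ===== SOURCE A (Python) =====
-- def sub_row(row, res, is_part2):
--     new_row = []
--     for i in range(len(row) - 1):
--         new_row.append(row[i+1] - row[i])
--
--     if all(element == 0 for element in new_row):
--         return res
--     else:
--         if is_part2:
--             res.append(new_row[0])
--         else:
--             res.append(new_row[-1])
--         return sub_row(new_row, res, is_part2)
-- ===== SOURCE B (Python) =====
-- def sub_row(row, res, is_part2):
--     # Iterative: compute successive difference rows, collecting the boundary
--     # value of each non-zero row; extends res in place like A and returns it.
--     cur = [b - a for a, b in zip(row, row[1:])]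
--     out = []
--     while any(cur):
--         out.append(cur[0] if is_part2 else cur[-1])
--         cur = [b - a for a, b in zip(cur, cur[1:])]
--     res.extend(out)
--     return res
-- ===== Notes on version B (the rewrite author's own statement) =====
-- stated objective: idiomatic
-- what changed: Replaces A's tail recursion (appending into res each level) with an explicit while loop over zip-based difference rows that collects the boundary values into a local list and extends res once at the end.
import Mathlib
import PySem

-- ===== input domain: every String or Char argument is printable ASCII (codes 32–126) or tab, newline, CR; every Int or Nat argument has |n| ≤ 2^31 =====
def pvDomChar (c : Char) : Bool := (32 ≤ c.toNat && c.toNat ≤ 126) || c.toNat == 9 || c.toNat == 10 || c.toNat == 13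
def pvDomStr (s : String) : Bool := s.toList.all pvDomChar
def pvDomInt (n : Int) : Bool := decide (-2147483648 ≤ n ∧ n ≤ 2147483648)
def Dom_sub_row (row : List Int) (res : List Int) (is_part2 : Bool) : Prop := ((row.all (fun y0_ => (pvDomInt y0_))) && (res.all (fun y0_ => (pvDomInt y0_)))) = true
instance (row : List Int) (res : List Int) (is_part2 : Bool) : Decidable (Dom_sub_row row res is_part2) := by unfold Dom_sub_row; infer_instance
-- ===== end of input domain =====

-- B replaces A's tail recursion with an explicit while loop collecting boundary values
-- of successive difference rows, then extends res once. (Both Pythons mutate res in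
-- place; the equivalence proved here is about the return value.)

-- ===== PORT A =====
-- A's loop 'for i in range(len(row)-1): new_row.append(row[i+1]-row[i])':
def aNewRow (row : List Int) : List Int :=
  (List.range (row.length - 1)).foldl
    (fun acc (i : Nat) =>
      acc ++ [(PySem.List.pyGet? row ((i : Int) + 1)).getD 0 - (PySem.List.pyGet? row (i : Int)).getD 0])
    []

-- needed by sub_row's termination proof (cited in decreasing_by)
theorem aNewRow_length (row : List Int) : (aNewRow row).length = row.length - 1 := by
  unfold aNewRow
  have h : ∀ (l : List Nat) (f : Nat → Int) (acc : List Int),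
      (l.foldl (fun acc (i : Nat) => acc ++ [f i]) acc).length = acc.length + l.length := by
    intro l f
    induction l with
    | nil => simp
    | cons x xs ih => intro acc; rw [List.foldl_cons, ih]; simp; omega
  simpa using h (List.range (row.length - 1)) _ []

def sub_row (row : List Int) (res : List Int) (is_part2 : Bool) : List Int :=
  let new_row := aNewRow row
  if new_row.all (fun element => element == 0) then res
  else
    let res2 := res ++ [if is_part2 then (PySem.List.pyGet? new_row 0).getD 0
                        else (PySem.List.pyGet? new_row (-1)).getD 0]
    sub_row new_row res2 is_part2
termination_by row.length
decreasing_by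
  have hl := aNewRow_length row
  have hne : aNewRow row ≠ [] := by
    intro hn
    simp only [new_row, hn] at *
    simp_all
  have : 0 < (aNewRow row).length := List.length_pos_iff.mpr hne
  omega

-- ===== PORT B =====
-- '[b - a for a, b in zip(xs, xs[1:])]':
def diffB (xs : List Int) : List Int := List.zipWith (fun a b => b - a) xs (xs.drop 1)

def loopB (cur : List Int) (is_part2 : Bool) : List Int :=
  if cur.any (fun e => e ≠ 0) then
    (if is_part2 then cur.headD 0 else (cur.getLast?).getD 0) :: loopB (diffB cur) is_part2
  else []
termination_by cur.length
decreasing_by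
  have hne : cur ≠ [] := by
    intro h; simp [h] at *
  have : 0 < cur.length := List.length_pos_iff.mpr hne
  simp [diffB]; omega

def sub_row_alt (row : List Int) (res : List Int) (is_part2 : Bool) : List Int :=
  res ++ loopB (diffB row) is_part2

-- ===== PRECONDITION & SPEC =====
def Spec_sub_row (row : List Int) (res : List Int) (is_part2 : Bool) (out : List Int) : Prop := out = sub_row_alt row res is_part2
instance (row : List Int) (res : List Int) (is_part2 : Bool) (out : List Int) : Decidable (Spec_sub_row row res is_part2 out) := by unfold Spec_sub_row; infer_instance

-- ===== CLAIM (what is proved, stated in full; the proofs are below) =====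
def Claim_equal_sub_row : Prop := ∀ (row : List Int) (res : List Int) (is_part2 : Bool), Dom_sub_row row res is_part2 → Spec_sub_row row res is_part2 (sub_row row res is_part2)

-- ===== LEMMAS AND PROOFS =====

theorem aNewRow_eq_diffB (row : List Int) : aNewRow row = diffB row := by
  have hf : ∀ (l : List Nat) (f : Nat → Int) (acc : List Int),
      (l.foldl (fun acc (i : Nat) => acc ++ [f i]) acc) = acc ++ l.map f := by
    intro l f
    induction l with
    | nil => simp
    | cons x xs ih => intro acc; rw [List.foldl_cons, ih]; simp
  unfold aNewRow
  rw [hf]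
  apply List.ext_getElem
  · simp [diffB]
  · intro i h1 h2
    simp only [List.nil_append, List.getElem_map, List.getElem_range]
    have hi : i < row.length - 1 := by simpa using h1
    have h1' : i < row.length := by omega
    have h2' : i + 1 < row.length := by omega
    rw [PySem.List.pyGet?_natCast]
    have : ((i : Int) + 1) = ((i + 1 : Nat) : Int) := by push_cast; ring
    rw [this, PySem.List.pyGet?_natCast]
    simp [diffB, h1', h2']

theorem sub_row_eq_loop (n : Nat) : ∀ (row res : List Int) (p2 : Bool), row.length ≤ n →
    sub_row row res p2 = res ++ loopB (diffB row) p2 := by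
  induction n with
  | zero =>
    intro row res p2 hlen
    have hrow : row = [] := List.eq_nil_of_length_eq_zero (by omega)
    subst hrow
    rw [sub_row, loopB]
    simp [aNewRow, diffB]
  | succ n ih =>
    intro row res p2 hlen
    rw [sub_row, loopB]
    simp only [aNewRow_eq_diffB]
    by_cases hz : (diffB row).all (fun e => e == 0)
    · have hall : ∀ x ∈ diffB row, x = 0 := by simpa using hz
      have hany : ((diffB row).any fun e => decide (e ≠ 0)) = false := by
        simp only [List.any_eq_false, decide_eq_true_eq, not_not]
        exact hall
      simp only [hz, if_true, hany, Bool.false_eq_true, if_false, List.append_nil]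
    · have hany : ((diffB row).any fun e => decide (e ≠ 0)) = true := by
        simp only [List.all_eq_true] at hz
        push Not at hz
        obtain ⟨x, hx, hxy⟩ := hz
        simp only [List.any_eq_true]
        exact ⟨x, hx, by simpa using hxy⟩
      have hne : diffB row ≠ [] := by
        intro h; rw [h] at hany; simp at hany
      have hlen' : (diffB row).length ≤ n := by
        have h0 : 0 < (diffB row).length := List.length_pos_iff.mpr hne
        have : (diffB row).length + 1 ≤ row.length := by
          simp only [diffB, List.length_zipWith, List.length_drop] at h0 ⊢; omega
        omega
      simp only [hz, hany, if_true]
      rw [ih (diffB row) _ p2 hlen']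
      have hhead : (PySem.List.pyGet? (diffB row) 0).getD 0 = (diffB row).headD 0 := by
        cases diffB row with
        | nil => simp [PySem.List.pyGet?]
        | cons a l => simp
      have hlast : (PySem.List.pyGet? (diffB row) (-1)).getD 0 = ((diffB row).getLast?).getD 0 := by
        rw [PySem.List.pyGet?_neg_one]
      cases p2 <;> simp [hhead, hlast]

-- ===== VERDICT (by name: the statement is the Claim_ definition above) =====
theorem sub_row_spec : Claim_equal_sub_row := by
  intro row res p2 _
  unfold Spec_sub_row sub_row_alt
  exact sub_row_eq_loop row.length row res p2 le_rfl
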